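-- pv_equiv track=rewrite | github.com/anfnn/uir | matr.py | matrica_down
-- ===== SOURCE A (Python) =====
-- def matrica_down(matrix):
--     n = len(matrix)
--     matrix_c = [[0] * (2 * n) for _ in range(2 * n)]
--     for i in range(n):
--         for j in range(2 * n):
--             matrix_c[i][j] = matrix[i][j]
--             matrix_c[2 * n - i - 1][j] = matrix[i][j]
--     return matrix_c
-- ===== SOURCE B (Python) =====
-- def matrica_down(matrix):
--     n2 = 2 * len(matrix)
--
--     def wrap(rows):
--         # mirror by recursion: first row becomes both the outermost top
--         # and outermost bottom row of the result, around the mirrored rest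
--         if not rows:
--             return []
--         head = [rows[0][j] for j in range(n2)]
--         return [head] + wrap(rows[1:]) + [list(head)]
--
--     return wrap(matrix)
-- ===== Notes on version B (the rewrite author's own statement) =====
-- stated objective: alternative
-- what changed: Replaces the preallocated 2n x 2n zero matrix with its nested i,j double-write loops and index arithmetic by a structural recursion that builds the palindrome of rows from the outside in: each row (copied to width 2n) is placed once at the top and once at the bottom around the recursively mirrored remaining rows.
import Mathlib
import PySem

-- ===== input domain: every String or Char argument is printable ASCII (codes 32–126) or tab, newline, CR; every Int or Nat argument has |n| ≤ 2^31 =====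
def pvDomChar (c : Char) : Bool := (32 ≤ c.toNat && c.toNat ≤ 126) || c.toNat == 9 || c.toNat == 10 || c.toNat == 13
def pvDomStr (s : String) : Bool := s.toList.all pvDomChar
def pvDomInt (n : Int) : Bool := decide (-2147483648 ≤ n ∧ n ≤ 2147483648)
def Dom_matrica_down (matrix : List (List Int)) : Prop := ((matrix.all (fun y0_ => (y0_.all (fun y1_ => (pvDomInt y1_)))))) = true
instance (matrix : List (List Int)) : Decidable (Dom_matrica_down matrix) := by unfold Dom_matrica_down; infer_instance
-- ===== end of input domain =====

-- B replaces A's preallocated 2n×2n zero matrix and nested i,j double-write loops by a structural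
-- recursion that builds the palindrome of rows from the outside in (objective: alternative).

-- ===== PORT A =====
-- body of A's inner loop: matrix_c[i][j] = matrix[i][j]; matrix_c[2n-i-1][j] = matrix[i][j]
def pvInnerStep (matrix : List (List Int)) (n i : Nat) (mc : List (List Int)) (j : Nat) : List (List Int) :=
  let v := (matrix.getD i []).getD j 0
  let mc := mc.set i ((mc.getD i []).set j v)
  mc.set (2*n - i - 1) ((mc.getD (2*n - i - 1) []).set j v)

-- A's inner loop 'for j in range(2*n)'
def pvOuterStep (matrix : List (List Int)) (n : Nat) (mc : List (List Int)) (i : Nat) : List (List Int) :=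
  (List.range (2*n)).foldl (pvInnerStep matrix n i) mc

def matrica_down (matrix : List (List Int)) : List (List Int) :=
  let n := matrix.length
  let matrix_c := List.replicate (2*n) (List.replicate (2*n) (0:Int))
  (List.range n).foldl (pvOuterStep matrix n) matrix_c

-- ===== PORT B =====
-- B's recursive 'wrap': head = [rows[0][j] for j in range(n2)] goes on top and bottom around wrap(rows[1:]);
-- getD's default 0 stands where Python raises IndexError (excluded by Pre_)
def pvWrap (n2 : Nat) : List (List Int) → List (List Int)
  | [] => []
  | r :: rs =>
    let head := (List.range n2).map (fun j => r.getD j 0)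
    head :: (pvWrap n2 rs ++ [head])

def matrica_down_alt (matrix : List (List Int)) : List (List Int) :=
  pvWrap (2 * matrix.length) matrix

-- ===== PRECONDITION & SPEC =====
-- Pre_ excludes exactly the inputs where A raises IndexError: a row shorter than 2*len(matrix).
def Pre_matrica_down (matrix : List (List Int)) : Prop :=
  ∀ row ∈ matrix, 2 * matrix.length ≤ row.length

instance (matrix : List (List Int)) : Decidable (Pre_matrica_down matrix) := by
  unfold Pre_matrica_down; infer_instance

def pvWitness_matrica_down : List (List Int) := [[1, 2]]

def Spec_matrica_down (matrix : List (List Int)) (out : List (List Int)) : Prop := out = matrica_down_alt matrix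
instance (matrix : List (List Int)) (out : List (List Int)) : Decidable (Spec_matrica_down matrix out) := by unfold Spec_matrica_down; infer_instance

-- ===== CLAIM (what is proved, stated in full; the proofs are below) =====
def Claim_equal_matrica_down : Prop := ∀ (matrix : List (List Int)), Dom_matrica_down matrix → Pre_matrica_down matrix → Spec_matrica_down matrix (matrica_down matrix)

-- ===== LEMMAS AND PROOFS =====

-- proof-only normal form of the mirror: rows (padded/truncated to width 2n) followed by their reversal
def pvAltRows (matrix : List (List Int)) : List (List Int) :=
  let n2 := 2 * matrix.length
  let top := matrix.map (fun row => (List.range n2).map (fun j => row.getD j 0))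
  top ++ top.reverse

-- entry (r,c) of a matrix-as-list-of-lists, with defaults (proof-only helper)
def pvE (s : List (List Int)) (r c : Nat) : Int := (s.getD r []).getD c 0

theorem pv_getD_set_row (l : List (List Int)) (i r : Nat) (x : List Int) :
    (l.set i x).getD r [] = if r = i ∧ i < l.length then x else l.getD r [] := by
  simp only [List.getD_eq_getElem?_getD, List.getElem?_set]
  split_ifs with h1 h2 h3 h4 <;> simp_all

theorem pv_getD_set_int (row : List Int) (j c : Nat) (v : Int) :
    (row.set j v).getD c 0 = if c = j ∧ j < row.length then v else row.getD c 0 := by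
  simp only [List.getD_eq_getElem?_getD, List.getElem?_set]
  split_ifs with h1 h2 h3 h4 <;> simp_all

theorem pv_len_set_row (l : List (List Int)) (i : Nat) (x : List Int)
    (hx : x.length = (l.getD i []).length) (r : Nat) :
    ((l.set i x).getD r []).length = (l.getD r []).length := by
  rw [pv_getD_set_row]
  split_ifs with h
  · rw [h.1, hx]
  · rfl

theorem pv_innerStep_length (matrix : List (List Int)) (n i : Nat) (mc : List (List Int)) (j : Nat) :
    (pvInnerStep matrix n i mc j).length = mc.length := by
  simp [pvInnerStep]

theorem pv_innerStep_rowlen (matrix : List (List Int)) (n i : Nat) (mc : List (List Int)) (j r : Nat) :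
    ((pvInnerStep matrix n i mc j).getD r []).length = (mc.getD r []).length := by
  simp only [pvInnerStep]
  exact (pv_len_set_row _ _ _ (by simp) r).trans (pv_len_set_row _ _ _ (by simp) r)

theorem pv_foldInner_length (matrix : List (List Int)) (n i : Nat) (js : List Nat) (mc : List (List Int)) :
    (js.foldl (pvInnerStep matrix n i) mc).length = mc.length := by
  induction js generalizing mc with
  | nil => rfl
  | cons j js ih => simpa [pv_innerStep_length] using ih (pvInnerStep matrix n i mc j)

theorem pv_foldInner_rowlen (matrix : List (List Int)) (n i : Nat) (js : List Nat) (mc : List (List Int)) (r : Nat) :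
    ((js.foldl (pvInnerStep matrix n i) mc).getD r []).length = (mc.getD r []).length := by
  induction js generalizing mc with
  | nil => rfl
  | cons j js ih => rw [List.foldl_cons, ih, pv_innerStep_rowlen]

theorem pv_innerStep_E (matrix : List (List Int)) (n i j r c : Nat) (mc : List (List Int))
    (hmc : mc.length = 2*n) (hrow : ∀ r', r' < 2*n → (mc.getD r' []).length = 2*n)
    (hi : i < n) (hj : j < 2*n) :
    pvE (pvInnerStep matrix n i mc j) r c =
      if (r = i ∨ r = 2*n - i - 1) ∧ c = j then (matrix.getD i []).getD j 0 else pvE mc r c := by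
  have hia : i ≠ 2*n - i - 1 := by omega
  have hi2 : i < 2*n := by omega
  have ha2 : 2*n - i - 1 < 2*n := by omega
  have hli : (mc.getD i []).length = 2*n := hrow i hi2
  have hla : (mc.getD (2*n - i - 1) []).length = 2*n := hrow _ ha2
  simp only [pvE, pvInnerStep, pv_getD_set_row, List.length_set]
  rw [if_neg (show ¬(2*n - i - 1 = i ∧ i < mc.length) from by omega)]
  by_cases hra : r = 2*n - i - 1
  · rw [if_pos ⟨hra, by omega⟩, pv_getD_set_int, hla]
    by_cases hcj : c = j
    · rw [if_pos ⟨hcj, hj⟩, if_pos ⟨Or.inr hra, hcj⟩]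
    · rw [if_neg (by tauto), if_neg (by tauto), hra]
  · rw [if_neg (by tauto)]
    by_cases hri : r = i
    · rw [if_pos ⟨hri, by omega⟩, pv_getD_set_int, hli]
      by_cases hcj : c = j
      · rw [if_pos ⟨hcj, hj⟩, if_pos ⟨Or.inl hri, hcj⟩]
      · rw [if_neg (by tauto), if_neg (by tauto), hri]
    · rw [if_neg (by tauto), if_neg (show ¬((r = i ∨ r = 2*n - i - 1) ∧ c = j) from by tauto)]

theorem pv_foldInner_E (matrix : List (List Int)) (n i m r c : Nat) (mc : List (List Int))
    (hmc : mc.length = 2*n) (hrow : ∀ r', r' < 2*n → (mc.getD r' []).length = 2*n)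
    (hi : i < n) (hm : m ≤ 2*n) :
    pvE ((List.range m).foldl (pvInnerStep matrix n i) mc) r c =
      if (r = i ∨ r = 2*n - i - 1) ∧ c < m then (matrix.getD i []).getD c 0 else pvE mc r c := by
  induction m with
  | zero => simp
  | succ m ih =>
    rw [List.range_succ, List.foldl_append, List.foldl_cons, List.foldl_nil]
    rw [pv_innerStep_E matrix n i m r c _
      (by rw [pv_foldInner_length]; exact hmc)
      (by intro r' hr'; rw [pv_foldInner_rowlen]; exact hrow r' hr')
      hi (by omega)]
    rw [ih (by omega)]
    by_cases hP : r = i ∨ r = 2*n - i - 1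
    · by_cases hc : c = m
      · subst hc
        rw [if_pos ⟨hP, rfl⟩, if_pos ⟨hP, by omega⟩]
      · rw [if_neg (by tauto)]
        by_cases hcm : c < m
        · rw [if_pos ⟨hP, hcm⟩, if_pos ⟨hP, by omega⟩]
        · rw [if_neg (by tauto), if_neg (by rintro ⟨_, h⟩; omega)]
    · rw [if_neg (by tauto), if_neg (by tauto), if_neg (by tauto)]

theorem pv_outerStep_E (matrix : List (List Int)) (n i r c : Nat) (mc : List (List Int))
    (hmc : mc.length = 2*n) (hrow : ∀ r', r' < 2*n → (mc.getD r' []).length = 2*n)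
    (hi : i < n) :
    pvE (pvOuterStep matrix n mc i) r c =
      if (r = i ∨ r = 2*n - i - 1) ∧ c < 2*n then (matrix.getD i []).getD c 0 else pvE mc r c := by
  exact pv_foldInner_E matrix n i (2*n) r c mc hmc hrow hi (le_refl _)

theorem pv_outerStep_length (matrix : List (List Int)) (n : Nat) (mc : List (List Int)) (i : Nat) :
    (pvOuterStep matrix n mc i).length = mc.length :=
  pv_foldInner_length matrix n i _ mc

theorem pv_outerStep_rowlen (matrix : List (List Int)) (n : Nat) (mc : List (List Int)) (i r : Nat) :
    ((pvOuterStep matrix n mc i).getD r []).length = (mc.getD r []).length :=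
  pv_foldInner_rowlen matrix n i _ mc r

theorem pv_foldOuter_length (matrix : List (List Int)) (n : Nat) (is : List Nat) (mc : List (List Int)) :
    (is.foldl (pvOuterStep matrix n) mc).length = mc.length := by
  induction is generalizing mc with
  | nil => rfl
  | cons i is ih => simpa [pv_outerStep_length] using ih (pvOuterStep matrix n mc i)

theorem pv_foldOuter_rowlen (matrix : List (List Int)) (n : Nat) (is : List Nat) (mc : List (List Int)) (r : Nat) :
    ((is.foldl (pvOuterStep matrix n) mc).getD r []).length = (mc.getD r []).length := by
  induction is generalizing mc with
  | nil => rfl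
  | cons i is ih => rw [List.foldl_cons, ih, pv_outerStep_rowlen]

theorem pv_init_rowlen (n r : Nat) (hr : r < 2*n) :
    ((List.replicate (2*n) (List.replicate (2*n) (0:Int))).getD r []).length = 2*n := by
  rw [List.getD_eq_getElem _ _ (by simpa using hr)]
  simp

theorem pv_E_init (n r c : Nat) :
    pvE (List.replicate (2*n) (List.replicate (2*n) (0:Int))) r c = 0 := by
  simp only [pvE, List.getD_eq_getElem?_getD, List.getElem?_replicate]
  split_ifs <;> simp

theorem pv_foldOuter_E (matrix : List (List Int)) (n k r c : Nat)
    (hn : n = matrix.length) (hk : k ≤ n) (hc : c < 2*n) :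
    pvE ((List.range k).foldl (pvOuterStep matrix n)
        (List.replicate (2*n) (List.replicate (2*n) (0:Int)))) r c =
      if r < k then pvE matrix r c
      else if 2*n - k ≤ r ∧ r < 2*n then pvE matrix (2*n - r - 1) c
      else 0 := by
  induction k with
  | zero =>
    rw [if_neg (by omega), if_neg (by omega)]
    simp [pv_E_init]
  | succ k ih =>
    rw [List.range_succ, List.foldl_append, List.foldl_cons, List.foldl_nil]
    rw [pv_outerStep_E matrix n k r c _
      (by rw [pv_foldOuter_length]; simp)
      (by intro r' hr'; rw [pv_foldOuter_rowlen]; exact pv_init_rowlen n r' hr')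
      (by omega)]
    rw [ih (by omega)]
    by_cases h1 : (r = k ∨ r = 2*n - k - 1) ∧ c < 2*n
    · rw [if_pos h1]
      rcases h1.1 with hk' | hk'
      · subst hk'; rw [if_pos (by omega)]; rfl
      · have hne : r ≠ k := by omega
        rw [if_neg (by omega), if_pos (by omega), hk']
        have h4 : 2*n - (2*n - k - 1) - 1 = k := by omega
        rw [h4]; rfl
    · rw [if_neg h1]
      by_cases h2 : r < k
      · rw [if_pos h2, if_pos (by omega)]
      · rw [if_neg h2]
        by_cases h3 : 2*n - k ≤ r ∧ r < 2*n
        · rw [if_pos h3, if_neg (by omega), if_pos (by omega)]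
        · rw [if_neg h3, if_neg (by omega), if_neg (by omega)]

-- pvAltRows' rows, characterised
theorem pv_alt_length (matrix : List (List Int)) :
    (pvAltRows matrix).length = 2 * matrix.length := by
  simp [pvAltRows]; omega

theorem pv_alt_getElem (matrix : List (List Int)) (r : Nat) (hr : r < 2 * matrix.length)
    (h : r < (pvAltRows matrix).length) :
    (pvAltRows matrix)[r] =
      (List.range (2 * matrix.length)).map
        (fun j => (matrix.getD (if r < matrix.length then r else 2 * matrix.length - r - 1) []).getD j 0) := by
  simp only [pvAltRows]
  by_cases hlt : r < matrix.length
  · rw [List.getElem_append_left (by simpa using hlt)]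
    rw [List.getElem_map]
    rw [if_pos hlt, List.getD_eq_getElem _ _ hlt]
  · rw [List.getElem_append_right (by simpa using hlt)]
    rw [List.getElem_reverse, List.getElem_map]
    rw [if_neg hlt]
    simp only [List.length_map]
    have h1 : matrix.length - 1 - (r - matrix.length) = 2 * matrix.length - r - 1 := by omega
    simp only [h1]
    rw [List.getD_eq_getElem _ _ (by omega)]

-- A's result equals the normal form (no precondition needed: both pad/truncate via getD)
theorem pv_A_eq_altRows (matrix : List (List Int)) : matrica_down matrix = pvAltRows matrix := by
  apply List.ext_getElem
  · rw [pv_alt_length]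
    simp [matrica_down, pv_foldOuter_length]
  · intro r h1 h2
    have hr2n : r < 2 * matrix.length := by
      simpa [matrica_down, pv_foldOuter_length] using h1
    have hAlen : ((matrica_down matrix).getD r []).length = 2 * matrix.length := by
      simp only [matrica_down]
      rw [pv_foldOuter_rowlen]
      exact pv_init_rowlen matrix.length r hr2n
    rw [pv_alt_getElem matrix r hr2n h2]
    apply List.ext_getElem
    · rw [← List.getD_eq_getElem _ [] h1, hAlen]
      simp
    · intro c hc1 hc2
      have hc2n : c < 2 * matrix.length := by
        rw [← List.getD_eq_getElem _ [] h1] at hc1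
        omega
      have hL : (matrica_down matrix)[r][c] = pvE (matrica_down matrix) r c := by
        rw [pvE, List.getD_eq_getElem _ [] h1, List.getD_eq_getElem _ _ hc1]
      rw [hL]
      have hE : pvE (matrica_down matrix) r c =
          if r < matrix.length then pvE matrix r c
          else if matrix.length ≤ r ∧ r < 2 * matrix.length then pvE matrix (2*matrix.length - r - 1) c
          else 0 := by
        simp only [matrica_down]
        rw [pv_foldOuter_E matrix matrix.length matrix.length r c rfl (le_refl _) hc2n]
        have h2n : 2 * matrix.length - matrix.length = matrix.length := by omega
        rw [h2n]
      rw [hE, List.getElem_map, List.getElem_range]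
      by_cases hlt : r < matrix.length
      · simp only [hlt, if_true]
        rfl
      · simp only [hlt, if_false]
        rw [if_pos (show matrix.length ≤ r ∧ r < 2*matrix.length from ⟨by omega, hr2n⟩)]
        rfl

-- B's recursive wrap unfolds to: mapped rows followed by their reversal
theorem pv_wrap_eq (n2 : Nat) (rows : List (List Int)) :
    pvWrap n2 rows = rows.map (fun row => (List.range n2).map (fun j => row.getD j 0)) ++
      (rows.map (fun row => (List.range n2).map (fun j => row.getD j 0))).reverse := by
  induction rows with
  | nil => rfl
  | cons r rs ih =>
    simp only [pvWrap, List.map_cons, List.reverse_cons, List.cons_append, ih]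
    simp

theorem pv_B_eq_altRows (matrix : List (List Int)) :
    matrica_down_alt matrix = pvAltRows matrix := by
  unfold matrica_down_alt pvAltRows
  rw [pv_wrap_eq]

-- ===== VERDICT (by name: the statement is the Claim_ definition above) =====
theorem matrica_down_spec : Claim_equal_matrica_down := by
  intro matrix _ _
  unfold Spec_matrica_down
  rw [pv_A_eq_altRows, pv_B_eq_altRows]
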